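-- pv_equiv track=rewrite | github.com/BoxMaster1999/appTemplate | app/core/toxisity_checker.py | transliteration_sound_en_ru
-- ===== SOURCE A (Python) =====
-- def transliteration_sound_en_ru(string):
--     transliteration_en_ru = {'sch': 'щ', 'sh': 'ш', 'ch': 'ч', 'ya': 'я', 'yo': 'ё', 'b': 'б', 'v': 'в', 'w': 'в',
--                              'g': 'г', 'd': 'д', 'e': 'е',
--                              'zh': 'ж', 'k': 'к', 'l': 'л', 'm': 'м', 'p': 'п', 'r': 'р', 't': 'т', 'f': 'ф',
--                              'n': 'н',
--                              's': 'с',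
--                              'c': 'с',
--                              'z': 'з',
--                              'a': 'а', 'o': 'о',
--                              'i': 'и', 'ja': 'я',
--                              'j': 'и',
--                              'u': 'у', 'y': 'ы', 'h': 'х', 'x': 'х', 'q': 'ку'}
--     transliteration_ordered_keys = ['sch', 'sh', 'ch', 'ya', 'yo', 'ja', 'a', 'e', 'o', 'i', 'y', 'u', 'c', 's',
--                                     'g', 'd', 'k', 'l', 'm', 'n', 'b', 'p', 'r', 't',
--                                     'f', 'x', 'v', 'zh', 'h', 'z', 'j', 'q']
--
--     # Здесь важен порядок перебора ключей словаря т.к. есть взаимовключающие наборы символов (etc. 'sch', 'sh', 's').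
--     # Важно использовать версию питона от 3.7, в которой сохраняется порядок перебора ключей ИЛИ вот такой список,
--     # что выше и по этой же причине не идем по пересечению ключей словаря и симолов в слове
--
--     for i in transliteration_ordered_keys:
--         string = string.replace(i, transliteration_en_ru[i])
--     return string
-- ===== SOURCE B (Python) =====
-- import re
--
--
-- def transliteration_sound_en_ru(string):
--     transliteration_en_ru = {'sch': 'щ', 'sh': 'ш', 'ch': 'ч', 'ya': 'я', 'yo': 'ё', 'b': 'б', 'v': 'в', 'w': 'в',
--                              'g': 'г', 'd': 'д', 'e': 'е',
--                              'zh': 'ж', 'k': 'к', 'l': 'л', 'm': 'м', 'p': 'п', 'r': 'р', 't': 'т', 'f': 'ф',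
--                              'n': 'н',
--                              's': 'с',
--                              'c': 'с',
--                              'z': 'з',
--                              'a': 'а', 'o': 'о',
--                              'i': 'и', 'ja': 'я',
--                              'j': 'и',
--                              'u': 'у', 'y': 'ы', 'h': 'х', 'x': 'х', 'q': 'ку'}
--     transliteration_ordered_keys = ['sch', 'sh', 'ch', 'ya', 'yo', 'ja', 'a', 'e', 'o', 'i', 'y', 'u', 'c', 's',
--                                     'g', 'd', 'k', 'l', 'm', 'n', 'b', 'p', 'r', 't',
--                                     'f', 'x', 'v', 'zh', 'h', 'z', 'j', 'q']
--     # One left-to-right pass: regex alternation is first-match-wins in key priority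
--     # order at each position, which reproduces the 32 sequential global replaces
--     # (replacement values never re-match, and no key overlaps a higher-priority one).
--     pattern = re.compile('|'.join(transliteration_ordered_keys))
--     return pattern.sub(lambda m: transliteration_en_ru[m.group(0)], string)
-- ===== Notes on version B (the rewrite author's own statement) =====
-- stated objective: idiomatic
-- what changed: Replaces the 32 sequential global str.replace passes by a single left-to-right pass: one compiled regex alternation of the ordered keys with re.sub looking each match up in the mapping; first-alternative-wins at each position reproduces the priority order.
import Mathlib
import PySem

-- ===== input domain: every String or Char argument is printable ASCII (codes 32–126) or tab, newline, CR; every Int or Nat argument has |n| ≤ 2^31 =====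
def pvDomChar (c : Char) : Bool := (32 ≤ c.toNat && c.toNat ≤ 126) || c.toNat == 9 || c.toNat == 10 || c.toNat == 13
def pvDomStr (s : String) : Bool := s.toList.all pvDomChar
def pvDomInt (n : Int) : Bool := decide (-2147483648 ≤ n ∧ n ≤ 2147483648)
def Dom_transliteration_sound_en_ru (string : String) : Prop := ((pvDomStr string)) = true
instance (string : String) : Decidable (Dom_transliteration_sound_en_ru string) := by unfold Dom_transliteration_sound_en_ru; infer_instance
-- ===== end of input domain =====

-- B replaces A's 32 sequential global replaces by one left-to-right first-match scan
-- (a compiled regex alternation); same return value, no side effects in either.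

-- ===== PORT A =====
-- A's local dict literal 'transliteration_en_ru' (as a top-level helper for the port)
def pvADict : PySem.Dict String String := PySem.Dict.ofList
  [("sch", "щ"), ("sh", "ш"), ("ch", "ч"), ("ya", "я"), ("yo", "ё"), ("b", "б"), ("v", "в"), ("w", "в"),
   ("g", "г"), ("d", "д"), ("e", "е"),
   ("zh", "ж"), ("k", "к"), ("l", "л"), ("m", "м"), ("p", "п"), ("r", "р"), ("t", "т"), ("f", "ф"),
   ("n", "н"), ("s", "с"), ("c", "с"), ("z", "з"), ("a", "а"), ("o", "о"),
   ("i", "и"), ("ja", "я"), ("j", "и"), ("u", "у"), ("y", "ы"), ("h", "х"), ("x", "х"), ("q", "ку")]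

-- A's local list 'transliteration_ordered_keys'
def pvAKeys : List String :=
  ["sch", "sh", "ch", "ya", "yo", "ja", "a", "e", "o", "i", "y", "u", "c", "s",
   "g", "d", "k", "l", "m", "n", "b", "p", "r", "t",
   "f", "x", "v", "zh", "h", "z", "j", "q"]

-- the for-loop of string.replace over the ordered keys; every key is present in the
-- dict, so Python's transliteration_en_ru[i] never raises; getD's default is unreachable
def transliteration_sound_en_ru (string : String) : String :=
  pvAKeys.foldl (fun s i => PySem.Str.replace s i (pvADict.getD i "")) string

-- ===== PORT B =====
-- Source B's ordered keys paired with their mapped values, in the order they are joined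
-- into the regex alternation pattern
def pvTbl : List (List Char × List Char) :=
  [(['s','c','h'], ['щ']), (['s','h'], ['ш']), (['c','h'], ['ч']), (['y','a'], ['я']), (['y','o'], ['ё']),
   (['j','a'], ['я']), (['a'], ['а']), (['e'], ['е']), (['o'], ['о']), (['i'], ['и']), (['y'], ['ы']),
   (['u'], ['у']), (['c'], ['с']), (['s'], ['с']), (['g'], ['г']), (['d'], ['д']), (['k'], ['к']),
   (['l'], ['л']), (['m'], ['м']), (['n'], ['н']), (['b'], ['б']), (['p'], ['п']), (['r'], ['р']),
   (['t'], ['т']), (['f'], ['ф']), (['x'], ['х']), (['v'], ['в']), (['z','h'], ['ж']), (['h'], ['х']),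
   (['z'], ['з']), (['j'], ['и']), (['q'], ['к','у'])]

-- hand port of re.sub with an alternation of literal keys ('re' is not in PySem):
-- at each position the FIRST alternative that matches wins, the replacement (the dict
-- value of the matched key) is emitted, and scanning resumes after the match;
-- a position where no alternative matches is copied verbatim.  This is exact for
-- Python's re semantics on a '|'-pattern of plain literals.
def pvScan (ks : List (List Char × List Char)) : List Char → List Char
  | [] => []
  | c :: t =>
    match ks.find? (fun kv => kv.1.isPrefixOf (c :: t)) with
    | some kv => kv.2 ++ pvScan ks (t.drop (kv.1.length - 1))
    | none => c :: pvScan ks t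
termination_by l => l.length
decreasing_by
  · simp only [List.length_drop, List.length_cons]; omega
  · simp

def transliteration_sound_en_ru_alt (string : String) : String :=
  String.ofList (pvScan pvTbl string.toList)

-- ===== PRECONDITION & SPEC =====
def Spec_transliteration_sound_en_ru (string : String) (out : String) : Prop := out = transliteration_sound_en_ru_alt string
instance (string : String) (out : String) : Decidable (Spec_transliteration_sound_en_ru string out) := by unfold Spec_transliteration_sound_en_ru; infer_instance

-- ===== CLAIM (what is proved, stated in full; the proofs are below) =====
def Claim_equal_transliteration_sound_en_ru : Prop := ∀ (string : String), Dom_transliteration_sound_en_ru string → Spec_transliteration_sound_en_ru string (transliteration_sound_en_ru string)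

-- ===== LEMMAS AND PROOFS =====

theorem pvScan_nil (ks : List (List Char × List Char)) : pvScan ks [] = [] := by
  simp [pvScan]

theorem pvScan_cons (ks : List (List Char × List Char)) (c : Char) (t : List Char) :
    pvScan ks (c :: t) =
      match ks.find? (fun kv => kv.1.isPrefixOf (c :: t)) with
      | some kv => kv.2 ++ pvScan ks (t.drop (kv.1.length - 1))
      | none => c :: pvScan ks t := by
  rw [pvScan]

theorem pvScan_empty_keys : ∀ l : List Char, pvScan [] l = l := by
  intro l
  induction l with
  | nil => simp [pvScan_nil]
  | cons c t ih => rw [pvScan_cons]; simp [ih]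


theorem pvScan_cons_some {ks : List (List Char × List Char)} {c : Char} {t : List Char}
    {kv : List Char × List Char}
    (h : ks.find? (fun kv => kv.1.isPrefixOf (c :: t)) = some kv) :
    pvScan ks (c :: t) = kv.2 ++ pvScan ks (t.drop (kv.1.length - 1)) := by
  rw [pvScan_cons, h]

theorem pvScan_cons_none {ks : List (List Char × List Char)} {c : Char} {t : List Char}
    (h : ks.find? (fun kv => kv.1.isPrefixOf (c :: t)) = none) :
    pvScan ks (c :: t) = c :: pvScan ks t := by
  rw [pvScan_cons, h]

theorem pvScan_single_emit (k v w : List Char) (hk : k ≠ []) :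
    pvScan [(k, v)] (k ++ w) = v ++ pvScan [(k, v)] w := by
  cases k with
  | nil => exact absurd rfl hk
  | cons d k₂ =>
    have hfind : [((d :: k₂ : List Char), v)].find?
        (fun kv => kv.1.isPrefixOf (d :: (k₂ ++ w))) = some (d :: k₂, v) := by
      have hp : (d :: k₂).isPrefixOf (d :: (k₂ ++ w)) = true := by
        rw [List.isPrefixOf_iff_prefix]
        exact List.cons_prefix_cons.mpr ⟨rfl, List.prefix_append _ _⟩
      simp [hp]
    simp only [List.cons_append]
    rw [pvScan_cons_some hfind]
    simp

-- replacement output is copied verbatim by a later scan whose key shares no character with it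
theorem pvSkip (k w : List Char) (hk : k ≠ []) :
    ∀ (u l : List Char), (∀ c ∈ u, c ∉ k) →
      pvScan [(k, w)] (u ++ l) = u ++ pvScan [(k, w)] l := by
  intro u
  induction u with
  | nil => intro l _; simp
  | cons c u' ih =>
    intro l hu
    have hnp : k.isPrefixOf (c :: (u' ++ l)) = false := by
      cases k with
      | nil => exact absurd rfl hk
      | cons d k₂ =>
        by_contra h
        have h' : (d :: k₂).isPrefixOf (c :: (u' ++ l)) = true := by
          cases hb : (d :: k₂).isPrefixOf (c :: (u' ++ l)) with
          | false => exact absurd hb h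
          | true => rfl
        rw [List.isPrefixOf_iff_prefix] at h'
        have hd : d = c := (List.cons_prefix_cons.mp h').1
        exact hu c (List.mem_cons_self) (by simp [← hd])
    have hnone : ([((k : List Char), w)]).find?
        (fun kv => kv.1.isPrefixOf (c :: (u' ++ l))) = none := by
      simp only [List.find?_cons, hnp, List.find?_nil]
    simp only [List.cons_append]
    rw [pvScan_cons_none hnone, ih l (fun c hc => hu c (List.mem_cons_of_mem _ hc))]

-- positions where no key matches are copied verbatim
theorem pvCopy (K : List (List Char × List Char)) :
    ∀ (m : ℕ) (s : List Char), m ≤ s.length →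
      (∀ i < m, K.find? (fun kv => kv.1.isPrefixOf (s.drop i)) = none) →
      pvScan K s = s.take m ++ pvScan K (s.drop m) := by
  intro m
  induction m with
  | zero => intro s _ _; simp
  | succ m ih =>
    intro s hlen h
    cases s with
    | nil => simp at hlen
    | cons c t =>
      have h0 := h 0 (Nat.succ_pos m)
      simp only [List.drop_zero] at h0
      rw [pvScan_cons_none h0]
      have ht := ih t (by simpa using hlen) (fun i hi => by
        have := h (i + 1) (by omega)
        simpa using this)
      rw [ht]
      simp

-- a prefix of the scan output made only of key characters is a prefix of the input
theorem pvPrefixScan (K : List (List Char × List Char)) (k : List Char)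
    (h : ∀ kv ∈ K, kv.2 ≠ [] ∧ ∀ c ∈ kv.2, c ∉ k) :
    ∀ (n : ℕ) (t k' : List Char), t.length ≤ n → k' <+: pvScan K t →
      (∀ c ∈ k', c ∈ k) → k' <+: t := by
  intro n
  induction n with
  | zero =>
    intro t k' hlen hp _
    have : t = [] := List.length_eq_zero_iff.mp (Nat.le_zero.mp hlen)
    subst this
    rw [pvScan_nil] at hp
    simp [List.prefix_nil.mp hp]
  | succ n ih =>
    intro t k' hlen hp hchars
    cases t with
    | nil =>
      rw [pvScan_nil] at hp
      simp [List.prefix_nil.mp hp]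
    | cons c t' =>
      cases hF : K.find? (fun kv => kv.1.isPrefixOf (c :: t')) with
      | none =>
        rw [pvScan_cons_none hF] at hp
        cases k' with
        | nil => exact List.nil_prefix
        | cons c'' k₂ =>
          have hcc : c'' = c := (List.cons_prefix_cons.mp hp).1
          have hk₂ : k₂ <+: pvScan K t' := (List.cons_prefix_cons.mp hp).2
          have := ih t' k₂ (by simpa using hlen) hk₂
            (fun x hx => hchars x (List.mem_cons_of_mem _ hx))
          exact List.cons_prefix_cons.mpr ⟨hcc, this⟩
      | some kv =>
        rw [pvScan_cons_some hF] at hp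
        have hmem : kv ∈ K := List.mem_of_find?_eq_some hF
        obtain ⟨hv2, hv⟩ := h kv hmem
        cases k' with
        | nil => exact List.nil_prefix
        | cons ch k₂ =>
          cases hkv2 : kv.2 with
          | nil => exact absurd hkv2 hv2
          | cons d rest =>
            rw [hkv2] at hp
            have hd : ch = d := (List.cons_prefix_cons.mp (by simpa using hp)).1
            exact absurd (hchars ch List.mem_cons_self) (by rw [hd]; exact hv d (by simp [hkv2]))

-- MERGE: running one more replace key after a scan over earlier keys equals the scan
-- with the key appended (lowest priority), under the non-interaction conditions
theorem pvMerge (K : List (List Char × List Char)) (k v : List Char)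
    (hk : k ≠ [])
    (hKvne : ∀ kv ∈ K, kv.2 ≠ [])
    (hval : ∀ kv ∈ K, ∀ c ∈ kv.2, c ∉ k)
    (hov : ∀ kv ∈ K, ∀ i, 0 < i → i < k.length →
      ¬ kv.1 <+: k.drop i ∧ ¬ k.drop i <+: kv.1) :
    ∀ (n : ℕ) (s : List Char), s.length ≤ n →
      pvScan [(k, v)] (pvScan K s) = pvScan (K ++ [(k, v)]) s := by
  intro n
  induction n with
  | zero =>
    intro s hlen
    have : s = [] := List.length_eq_zero_iff.mp (Nat.le_zero.mp hlen)
    subst this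
    simp [pvScan_nil]
  | succ n ih =>
    intro s hlen
    cases s with
    | nil => simp [pvScan_nil]
    | cons c t =>
      cases hF : K.find? (fun kv => kv.1.isPrefixOf (c :: t)) with
      | some kv =>
        -- an earlier key matches here: both sides emit its value and continue
        rw [pvScan_cons_some hF]
        have hmem : kv ∈ K := List.mem_of_find?_eq_some hF
        rw [pvSkip k v hk kv.2 _ (hval kv hmem)]
        rw [ih (t.drop (kv.1.length - 1))
          (by simp only [List.length_drop]; simp only [List.length_cons] at hlen; omega)]
        have hF' : (K ++ [(k, v)]).find? (fun kv => kv.1.isPrefixOf (c :: t)) = some kv := by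
          rw [List.find?_append, hF]; rfl
        rw [pvScan_cons_some hF']
      | none =>
        cases hkp : k.isPrefixOf (c :: t) with
        | true =>
          -- the new key matches here and no earlier key touches its span
          rw [pvScan_cons_none hF]
          have hkpre : k <+: (c :: t) := List.isPrefixOf_iff_prefix.mp hkp
          obtain ⟨r, hr⟩ := hkpre
          have hkpre2 : k <+: (c :: t) := ⟨r, hr⟩
          have hL1 : 1 ≤ k.length := by
            cases k with
            | nil => exact absurd rfl hk
            | cons _ _ => simp
          have hLle : k.length ≤ t.length + 1 := by
            have := congrArg List.length hr
            simp at this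
            omega
          -- no earlier key matches at positions 1 .. k.length-1
          have hC1 : ∀ i, i < k.length - 1 →
              K.find? (fun kv => kv.1.isPrefixOf (t.drop i)) = none := by
            intro i hi
            rw [List.find?_eq_none]
            intro kv hm
            simp only [Bool.not_eq_true]
            cases hx : kv.1.isPrefixOf (t.drop i) with
            | false => rfl
            | true =>
              exfalso
              have hb : kv.1 <+: t.drop i := List.isPrefixOf_iff_prefix.mp hx
              have hdrop : t.drop i = k.drop (i + 1) ++ r := by
                have h1 : (c :: t).drop (i + 1) = k.drop (i + 1) ++ r := by
                  rw [← hr]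
                  exact List.drop_append_of_le_length (by omega)
                simpa using h1
              rw [hdrop] at hb
              have hcomp := List.prefix_or_prefix_of_prefix hb (List.prefix_append _ r)
              obtain ⟨h1, h2⟩ := hov kv hm (i + 1) (by omega) (by omega)
              rcases hcomp with hc | hc
              · exact h1 hc
              · exact h2 hc
          rw [pvCopy K (k.length - 1) t (by omega) hC1]
          have hhead : c :: t.take (k.length - 1) = k := by
            have hktake : k = (c :: t).take k.length := List.prefix_iff_eq_take.mp hkpre2
            rw [hktake]
            cases hKL : k.length with
            | zero => omega
            | succ m => simp
          have hform : c :: (t.take (k.length - 1) ++ pvScan K (t.drop (k.length - 1)))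
              = k ++ pvScan K (t.drop (k.length - 1)) := by
            rw [← List.cons_append, hhead]
          rw [hform]
          rw [pvScan_single_emit k v _ hk]
          rw [ih (t.drop (k.length - 1))
            (by simp only [List.length_drop]; simp only [List.length_cons] at hlen; omega)]
          have hF' : (K ++ [(k, v)]).find? (fun kv => kv.1.isPrefixOf (c :: t)) = some (k, v) := by
            rw [List.find?_append, hF]
            simp [hkp]
          rw [pvScan_cons_some hF']
        | false =>
          -- no key at all matches at this position: both sides copy c
          rw [pvScan_cons_none hF]
          have hknp : ¬ k <+: (c :: pvScan K t) := by
            intro hkpre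
            cases k with
            | nil => exact hk rfl
            | cons d k₂ =>
              have hd : d = c := (List.cons_prefix_cons.mp hkpre).1
              have hk₂ : k₂ <+: pvScan K t := (List.cons_prefix_cons.mp hkpre).2
              have hsub : k₂ <+: t := by
                refine pvPrefixScan K (d :: k₂) ?_ t.length t k₂ le_rfl hk₂ ?_
                · intro kv hm
                  exact ⟨hKvne kv hm, hval kv hm⟩
                · intro x hx
                  exact List.mem_cons_of_mem _ hx
              have : (d :: k₂).isPrefixOf (c :: t) = true := by
                rw [List.isPrefixOf_iff_prefix]
                exact List.cons_prefix_cons.mpr ⟨hd, hsub⟩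
              rw [this] at hkp
              simp at hkp
          have hFk : ([((k : List Char), v)]).find?
              (fun kv => kv.1.isPrefixOf (c :: pvScan K t)) = none := by
            rw [List.find?_eq_none]
            intro kv hm
            simp only [List.mem_singleton] at hm
            subst hm
            simp only [Bool.not_eq_true]
            cases hx : k.isPrefixOf (c :: pvScan K t) with
            | false => rfl
            | true => exact absurd (List.isPrefixOf_iff_prefix.mp hx) hknp
          rw [pvScan_cons_none hFk]
          rw [ih t (by simpa using hlen)]
          have hF' : (K ++ [(k, v)]).find? (fun kv => kv.1.isPrefixOf (c :: t)) = none := by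
            rw [List.find?_append, hF]
            simp [hkp]
          rw [pvScan_cons_none hF']

-- Python's str.replace (nonempty pattern) is the single-key scan
theorem pvReplaceGo (old new : List Char) (hold : old ≠ []) :
    ∀ (fuel : ℕ) (l acc : List Char), l.length ≤ fuel →
      PySem.Chars.replace.go old new fuel l acc = acc.reverse ++ pvScan [(old, new)] l := by
  intro fuel
  induction fuel with
  | zero =>
    intro l acc hlen
    have : l = [] := List.length_eq_zero_iff.mp (Nat.le_zero.mp hlen)
    subst this
    simp [PySem.Chars.replace.go, pvScan_nil]
  | succ fuel ih =>
    intro l acc hlen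
    cases l with
    | nil => simp [PySem.Chars.replace.go, pvScan_nil]
    | cons c t =>
      rw [PySem.Chars.replace.go]
      have hlold : 1 ≤ old.length := by
        cases old with
        | nil => exact absurd rfl hold
        | cons _ _ => simp
      cases hp : old.isPrefixOf (c :: t) with
      | true =>
        simp only [if_true]
        have hdrop : (c :: t).drop old.length = t.drop (old.length - 1) := by
          cases hO : old.length with
          | zero => omega
          | succ m => simp
        rw [ih ((c :: t).drop old.length) (new.reverse ++ acc)
          (by simp only [List.length_drop, List.length_cons]; simp only [List.length_cons] at hlen; omega)]
        have hfind : [((old : List Char), new)].find?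
            (fun kv => kv.1.isPrefixOf (c :: t)) = some (old, new) := by
          simp [hp]
        rw [pvScan_cons_some hfind, hdrop]
        simp [List.append_assoc]
      | false =>
        simp only [Bool.false_eq_true, if_false]
        rw [ih t (c :: acc) (by simp only [List.length_cons] at hlen; omega)]
        have hfindn : [((old : List Char), new)].find?
            (fun kv => kv.1.isPrefixOf (c :: t)) = none := by
          simp [hp]
        rw [pvScan_cons_none hfindn]
        simp

theorem pvReplaceEq (old new s : List Char) (hold : old ≠ []) :
    PySem.Chars.replace s old new = pvScan [(old, new)] s := by
  unfold PySem.Chars.replace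
  have : old.isEmpty = false := by
    cases old with
    | nil => exact absurd rfl hold
    | cons _ _ => rfl
  rw [this]
  simp only [Bool.false_eq_true, if_false]
  rw [pvReplaceGo old new hold s.length s [] le_rfl]
  rfl

-- decidable non-interaction condition of one new key against the earlier keys
def pvCond (K : List (List Char × List Char)) (k : List Char) : Bool :=
  !k.isEmpty && K.all (fun kv =>
    !kv.1.isEmpty && !kv.2.isEmpty && kv.2.all (fun c => !k.contains c) &&
    (List.range k.length).all (fun i =>
      i == 0 || (!kv.1.isPrefixOf (k.drop i) && !(k.drop i).isPrefixOf kv.1)))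

theorem pvCond_spec (K : List (List Char × List Char)) (k : List Char)
    (h : pvCond K k = true) :
    k ≠ [] ∧ (∀ kv ∈ K, kv.2 ≠ []) ∧ (∀ kv ∈ K, ∀ c ∈ kv.2, c ∉ k) ∧
    (∀ kv ∈ K, ∀ i, 0 < i → i < k.length →
      ¬ kv.1 <+: k.drop i ∧ ¬ k.drop i <+: kv.1) := by
  simp only [pvCond, Bool.and_eq_true, List.all_eq_true, Bool.not_eq_true'] at h
  obtain ⟨hk, hK⟩ := h
  refine ⟨?_, ?_, ?_, ?_⟩
  · intro he; subst he; simp at hk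
  · intro kv hm he
    have := (((hK kv hm).1).1).2
    rw [he] at this; simp at this
  · intro kv hm c hc hck
    have := ((hK kv hm).1).2 c hc
    simp at this
    exact this hck
  · intro kv hm i hi0 hil
    have h2 := (hK kv hm).2 i (List.mem_range.mpr hil)
    simp only [Bool.or_eq_true, beq_iff_eq, Bool.and_eq_true, Bool.not_eq_true'] at h2
    rcases h2 with h2 | ⟨ha, hb⟩
    · omega
    · constructor
      · intro hc
        rw [← List.isPrefixOf_iff_prefix] at hc
        rw [hc] at ha; simp at ha
      · intro hc
        rw [← List.isPrefixOf_iff_prefix] at hc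
        rw [hc] at hb; simp at hb

def pvCondChain : List (List Char × List Char) → List (List Char × List Char) → Bool
  | _, [] => true
  | done, kv :: rest => pvCond done kv.1 && pvCondChain (done ++ [kv]) rest

-- sequential replaces over 'todo' after a scan over 'done' equal one scan over both
theorem pvChain : ∀ (todo done : List (List Char × List Char)),
    pvCondChain done todo = true → ∀ s : List Char,
      todo.foldl (fun l kv => PySem.Chars.replace l kv.1 kv.2) (pvScan done s)
        = pvScan (done ++ todo) s := by
  intro todo
  induction todo with
  | nil => intro done _ s; simp
  | cons kv rest ih =>
    intro done h s
    have h' : pvCond done kv.1 = true ∧ pvCondChain (done ++ [kv]) rest = true := by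
      rw [pvCondChain] at h
      exact Bool.and_eq_true_iff.mp h
    obtain ⟨hc, hrest⟩ := h'
    obtain ⟨hk, hKv, hval, hov⟩ := pvCond_spec done kv.1 hc
    rw [List.foldl_cons]
    have hstep : PySem.Chars.replace (pvScan done s) kv.1 kv.2 = pvScan (done ++ [kv]) s := by
      rw [pvReplaceEq _ _ _ hk]
      have := pvMerge done kv.1 kv.2 hk hKv hval hov s.length s le_rfl
      simpa using this
    rw [hstep]
    have := ih (done ++ [kv]) hrest s
    rw [this]
    simp
-- bridge: A's String-level fold equals the char-level fold over the key/value pairs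
theorem pvFoldlLookup (ks : List String) (d : PySem.Dict String String) :
    ∀ s : String,
      ks.foldl (fun str i => PySem.Str.replace str i (d.getD i "")) s
        = String.ofList ((ks.map (fun i => (i.toList, (d.getD i "").toList))).foldl
            (fun l kv => PySem.Chars.replace l kv.1 kv.2) s.toList) := by
  induction ks with
  | nil => intro s; simp
  | cons k rest ih =>
    intro s
    rw [List.foldl_cons, ih, List.map_cons, List.foldl_cons]
    congr 1
    simp [PySem.Str.toList_replace]

set_option maxRecDepth 100000 in
theorem pvMain (s : String) :
    transliteration_sound_en_ru s = transliteration_sound_en_ru_alt s := by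
  unfold transliteration_sound_en_ru transliteration_sound_en_ru_alt
  rw [pvFoldlLookup]
  have hmap : pvAKeys.map (fun i => (i.toList, (pvADict.getD i "").toList)) = pvTbl := by rfl
  rw [hmap]
  have h := pvChain pvTbl [] (by rfl) s.toList
  rw [pvScan_empty_keys] at h
  simp only [List.nil_append] at h
  rw [h]

-- ===== VERDICT (by name: the statement is the Claim_ definition above) =====
theorem transliteration_sound_en_ru_spec : Claim_equal_transliteration_sound_en_ru := by
  intro s _
  unfold Spec_transliteration_sound_en_ru
  exact pvMain s
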